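-- pv_equiv track=rewrite | github.com/kravee/datto-challenge | numberOfDevices.py | numberOfDevices
-- ===== SOURCE A (Python) =====
-- def numberOfDevices(connections, toggleIps):
--     '''
--     the function return number of connection devices to single ip.
--     for example:
--     connections=[["192.167.0.0","192.167.0.1"],["192.167.0.2","192.167.0.0"],["192.167.0.0","192.167.0.3"]]
--     toggleIps =["192.167.0.1","192.167.0.0","192.167.0.2","192.167.0.0","0.0.0.0"]
--     the output will be [0, 1, 1, 2, 0]
--     "192.167.0.1" would become active and is a part of connection ["192.167.0.0","192.167.0.1"], howewer no other devices active => 0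
--     "192.167.0.0" would become active and is a part of connection ["192.167.0.0","192.167.0.1"] "192.167.0.1" already active => 1
--     "192.167.0.2" would become active and is a part of connection ["192.167.0.2","192.167.0.0"] "192.167.0.0" already active => 1
--     "192.167.0.0" would become inactive is exist in 2 connection => 2
--     "0.0.0.0" would become active, no connection => 0
--     :param connections: list of connection IP pair
--     :param toggleIps: sequence of single IP
--     :return: list of connection to each single IP
--     '''
--     class ip_connection:
--         '''
--         each device will have object with 3 variable
--         ip
--         active
--         list of connected devices
--         '''
--         active = 0
--         def __init__(self, ip_address, connection_list):
--             self._ip_address = ip_address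
--             self._connection_list = connection_list
--
--         def connection_list(self):
--             return self._connection_list
--
--         def ip_address(self):
--             return self._ip_address
--
--     def deviceConnectivityMap(connections, toggleIps):
--         '''
--         The function get connection and ip, will build list of object, each one will have 3 variable
--         device IP
--         active => 1/0
--         list of connected devices
--         :param connections: list 2x2 of connected devices
--         :param toggleIps: list
--         :return: list of object
--         '''
--         list_ip = []
--         uniqtoggleIps = list(dict.fromkeys(toggleIps))
--         for i in uniqtoggleIps:
--             device_ip = i
--             connectin_list = []
--             for y in connections:
--                 if y[0] == device_ip or y[1] == device_ip:
--                     if y[0] == device_ip: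
--                         connectin_list.append(y[1])
--                     else:
--                         connectin_list.append(y[0])
--             device_data = ip_connection(device_ip,connectin_list)
--             list_ip.append(device_data)
--
--         return list_ip
--
--     def connectionNumber(deviceConnection, allDevices):
--         '''
--         The function get list of connected devices to relevant device and list of object with all devices in network
--         Will return the number ok connected devices only to relevant device
--         :param deviceConnection: list of all connected devices
--         :param allDevices: list of alldevices(class)
--         :return: int
--         '''
--
--         connection = 0
--         for i in deviceConnection:
--             for y in allDevices:
--                 if i == y.ip_address():
--                     connection += y.active
--         return connection
--
--     result = []
--     numberActiveConnection = 0
--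
--     deviceMap = deviceConnectivityMap(connections,toggleIps)
--
--     for i in toggleIps:
--         for y in deviceMap:
--             if i == y.ip_address():
--                 numberActiveConnection = connectionNumber(y.connection_list(), deviceMap)
--                 if y.active == 0:
--                     y.active = 1
--                 else:
--                     y.active = 0
--         result.append(numberActiveConnection)
--
--
--     return result
-- ===== SOURCE B (Python) =====
-- def numberOfDevices(connections, toggleIps):
--     # Build adjacency once, then answer each toggle with one pass over the
--     # toggled IP's neighbor list (neighbors never toggled count as inactive).
--     adj = {}
--     for c in connections:
--         a, b = c[0], c[1]
--         adj.setdefault(a, []).append(b)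
--         if a != b:
--             adj.setdefault(b, []).append(a)
--     active = {}
--     result = []
--     for t in toggleIps:
--         result.append(sum(active.get(n, 0) for n in adj.get(t, [])))
--         active[t] = 1 - active.get(t, 0)
--     return result
-- ===== Notes on version B (the rewrite author's own statement) =====
-- stated objective: faster
-- what changed: Replaces the per-unique-ip rescans of connections and the nested scan over all device objects per toggle with one adjacency dict built in a single pass over connections plus an active-state dict, so each toggle costs only the toggled IP's degree.
-- outside the precondition, e.g. on numberOfDevices([['x']], []): A returns [], B raises IndexError
import Mathlib
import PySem

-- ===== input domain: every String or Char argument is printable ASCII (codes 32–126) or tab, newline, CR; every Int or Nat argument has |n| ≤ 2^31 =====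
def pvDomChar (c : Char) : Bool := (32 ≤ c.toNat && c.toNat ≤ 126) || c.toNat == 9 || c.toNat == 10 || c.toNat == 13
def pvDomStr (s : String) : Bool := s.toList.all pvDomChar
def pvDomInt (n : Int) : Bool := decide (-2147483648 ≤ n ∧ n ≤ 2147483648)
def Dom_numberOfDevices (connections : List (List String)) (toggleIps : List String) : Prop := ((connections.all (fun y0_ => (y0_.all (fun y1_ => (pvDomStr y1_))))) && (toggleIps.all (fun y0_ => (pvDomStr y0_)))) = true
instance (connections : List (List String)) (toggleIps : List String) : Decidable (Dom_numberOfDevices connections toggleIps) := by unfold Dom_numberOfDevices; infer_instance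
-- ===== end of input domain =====

-- B replaces A's repeated rescans of connections and device objects by an adjacency dict plus
-- an active-state dict (one pass per toggle over the toggled IP's neighbors): faster, asymptotic.


-- ===== PORT A =====
-- neighbor list of device i (A scans connections once per unique toggle ip); the `| _ => acc`
-- arm covers connection entries shorter than 2, where the Python raises IndexError (outside Pre_)
def pvNeighStep (i : String) (acc : List String) (y : List String) : List String :=
  match y with
  | a :: b :: _ => if a == i || b == i then acc ++ [if a == i then b else a] else acc
  | _ => acc

def pvNeighbors (connections : List (List String)) (i : String) : List String :=
  connections.foldl (pvNeighStep i) []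

-- connectionNumber: nested scan of all device objects per neighbor
def pvConnNumber (conn : List String) (dm : List (String × List String × Int)) : Int :=
  conn.foldl (fun c i => dm.foldl (fun c y => if i == y.1 then c + y.2.2 else c) c) 0

-- one toggle step of A's main loop (the in-place flip of the single matching object)
def pvStepA (st : List (String × List String × Int) × List Int × Int) (i : String) :
    List (String × List String × Int) × List Int × Int :=
  let nac := st.1.foldl (fun n y => if i == y.1 then pvConnNumber y.2.1 st.1 else n) st.2.2
  let dm := st.1.map (fun y => if i == y.1 then (y.1, y.2.1, if y.2.2 == 0 then (1:Int) else 0) else y)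
  (dm, st.2.1 ++ [nac], nac)

def numberOfDevices (connections : List (List String)) (toggleIps : List String) : List Int :=
  let dm0 := (PySem.List.dedup toggleIps).map (fun i => (i, pvNeighbors connections i, (0:Int)))
  (toggleIps.foldl pvStepA (dm0, ([] : List Int), (0:Int))).2.1

-- ===== PORT B =====
-- adjacency dict built in one pass over connections (setdefault/append)
def pvAdjStep (d : PySem.Dict String (List String)) (c : List String) :
    PySem.Dict String (List String) :=
  match c with
  | a :: b :: _ =>
    let d1 := d.insert a (d.getD a [] ++ [b])
    if a != b then d1.insert b (d1.getD b [] ++ [a]) else d1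
  | _ => d

def numberOfDevices_alt (connections : List (List String)) (toggleIps : List String) : List Int :=
  let adj := connections.foldl pvAdjStep PySem.Dict.empty
  (toggleIps.foldl
    (fun (st : PySem.Dict String Int × List Int) t =>
      let cnt := ((adj.getD t []).map (fun n => st.1.getD n 0)).sum
      (st.1.insert t (1 - st.1.getD t 0), st.2 ++ [cnt]))
    (PySem.Dict.empty, ([] : List Int))).2

-- ===== PRECONDITION & SPEC =====
-- Pre_ requires every connection entry to have at least two elements: on shorter entries Python A
-- raises IndexError whenever toggleIps is nonempty, and B (which indexes every entry up front)
-- raises even when toggleIps is empty — the only excluded inputs on which A still returns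
-- (returning []) are those with empty toggleIps, cited in claim.json.
def Pre_numberOfDevices (connections : List (List String)) (toggleIps : List String) : Prop :=
  ∀ c ∈ connections, 2 ≤ c.length
instance (connections : List (List String)) (toggleIps : List String) : Decidable (Pre_numberOfDevices connections toggleIps) := by unfold Pre_numberOfDevices; infer_instance

def pvWitness_numberOfDevices : List (List String) × List String :=
  ([["192.167.0.0", "192.167.0.1"], ["192.167.0.2", "192.167.0.0"]], ["192.167.0.1", "192.167.0.0", "192.167.0.2"])

def Spec_numberOfDevices (connections : List (List String)) (toggleIps : List String) (out : List Int) : Prop := out = numberOfDevices_alt connections toggleIps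
instance (connections : List (List String)) (toggleIps : List String) (out : List Int) : Decidable (Spec_numberOfDevices connections toggleIps out) := by unfold Spec_numberOfDevices; infer_instance

-- ===== CLAIM (what is proved, stated in full; the proofs are below) =====
def Claim_equal_numberOfDevices : Prop := ∀ (connections : List (List String)) (toggleIps : List String), Dom_numberOfDevices connections toggleIps → Pre_numberOfDevices connections toggleIps → Spec_numberOfDevices connections toggleIps (numberOfDevices connections toggleIps)

-- ===== LEMMAS AND PROOFS =====

-- one connection entry updates the adjacency dict exactly as A's per-device scan appends
lemma pvAdjStepGetD (d : PySem.Dict String (List String)) (c : List String) (t : String) :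
    (pvAdjStep d c).getD t [] = pvNeighStep t (d.getD t []) c := by
  match c with
  | [] => rfl
  | [a] => rfl
  | a :: b :: rest =>
    simp only [pvAdjStep, pvNeighStep, bne_iff_ne]
    by_cases hab : a = b
    · subst hab
      rw [if_neg (by simp)]
      by_cases hta : t = a
      · subst hta; simp [PySem.Dict.getD_insert]
      · simp [PySem.Dict.getD_insert, hta, beq_iff_eq, Ne.symm hta]
    · rw [if_pos hab]
      by_cases hta : t = a
      · subst hta
        have hbt : ¬ (b = t) := fun h => hab h.symm
        simp [PySem.Dict.getD_insert, hab, hbt]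
      · by_cases htb : t = b
        · subst htb
          simp [PySem.Dict.getD_insert, hta, Ne.symm hta, beq_iff_eq]
        · simp [PySem.Dict.getD_insert, hta, htb, Ne.symm hta, Ne.symm htb, beq_iff_eq]

-- the adjacency dict's list for t is exactly A's neighbor list of t
lemma pvAdjFoldGetD (cs : List (List String)) (d : PySem.Dict String (List String)) (t : String) :
    (cs.foldl pvAdjStep d).getD t [] = cs.foldl (pvNeighStep t) (d.getD t []) := by
  induction cs generalizing d with
  | nil => rfl
  | cons c cs ih => simp only [List.foldl_cons, ih, pvAdjStepGetD]

lemma pvAdjGetD (cs : List (List String)) (t : String) :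
    (cs.foldl pvAdjStep PySem.Dict.empty).getD t [] = pvNeighbors cs t := by
  rw [pvAdjFoldGetD, pvNeighbors, PySem.Dict.getD_empty]

-- A's inner scan over the device map sums the active bit of the (unique) device named i
lemma pvInnerSum (g : String → List String) (act : String → Int) (i : String)
    (uniq : List String) : uniq.Nodup → ∀ c : Int,
    (uniq.map (fun j => (j, g j, act j))).foldl
        (fun c y => if i == y.1 then c + y.2.2 else c) c
      = c + (if i ∈ uniq then act i else 0) := by
  induction uniq with
  | nil => intro _ c; simp
  | cons j tl ih =>
    intro hnd c
    rw [List.nodup_cons] at hnd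
    simp only [List.map_cons, List.foldl_cons]
    by_cases hij : i = j
    · subst hij
      rw [if_pos (by simp), ih hnd.2 (c + act i), if_neg hnd.1,
        if_pos (List.mem_cons_self ..)]
      ring
    · rw [if_neg (by simp [hij]), ih hnd.2 c]
      simp [hij]

-- A's outer scan over the device map selects F at the unique device named t
lemma pvOuterSelect (g : String → List String) (act : String → Int)
    (F : List String → Int) (t : String)
    (uniq : List String) : uniq.Nodup → ∀ nac : Int,
    (uniq.map (fun j => (j, g j, act j))).foldl
        (fun n y => if t == y.1 then F y.2.1 else n) nac
      = if t ∈ uniq then F (g t) else nac := by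
  induction uniq with
  | nil => intro _ nac; simp
  | cons j tl ih =>
    intro hnd nac
    rw [List.nodup_cons] at hnd
    simp only [List.map_cons, List.foldl_cons]
    by_cases htj : t = j
    · subst htj
      rw [if_pos (by simp), ih hnd.2 _, if_neg hnd.1, if_pos (List.mem_cons_self ..)]
    · rw [if_neg (by simp [htj]), ih hnd.2 _]
      simp [htj]

-- flipping the matching device's bit is a pointwise update of the map
lemma pvFlipMap (uniq : List String) (g : String → List String) (act : String → Int) (t : String) :
    (uniq.map (fun j => (j, g j, act j))).map
        (fun y => if t == y.1 then (y.1, y.2.1, if y.2.2 == 0 then (1:Int) else 0) else y)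
      = uniq.map (fun j => (j, g j,
          if j = t then (if act j == 0 then (1:Int) else 0) else act j)) := by
  rw [List.map_map]
  refine List.map_congr_left (fun j _ => ?_)
  by_cases hjt : j = t
  · subst hjt; simp
  · simp [hjt, Ne.symm hjt, beq_iff_eq]

-- A's connectionNumber over the device map is a plain sum of active bits over the neighbor list
lemma pvConnNumberEq (uniq : List String) (hnd : uniq.Nodup) (g : String → List String)
    (A : PySem.Dict String Int) (hout : ∀ i, i ∉ uniq → A.getD i 0 = 0) (conn : List String) :
    pvConnNumber conn (uniq.map (fun j => (j, g j, A.getD j 0)))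
      = (conn.map (fun n => A.getD n 0)).sum := by
  unfold pvConnNumber
  have h : (fun (c : Int) (i : String) =>
        (uniq.map (fun j => (j, g j, A.getD j 0))).foldl
          (fun c y => if i == y.1 then c + y.2.2 else c) c)
      = fun c i => c + A.getD i 0 := by
    funext c i
    rw [pvInnerSum g _ i uniq hnd c]
    by_cases h : i ∈ uniq
    · simp [h]
    · simp [h, hout i h]
  rw [h, PySem.List.foldl_add]
  simp

-- the central invariant: A's device-map fold and B's dict fold produce the same result list
lemma pvMainInv (connections : List (List String)) (uniq : List String) (hnd : uniq.Nodup)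
    (adj : PySem.Dict String (List String))
    (hadj : ∀ t, adj.getD t [] = pvNeighbors connections t) :
    ∀ (ts : List String), (∀ t ∈ ts, t ∈ uniq) →
    ∀ (A : PySem.Dict String Int) (res : List Int) (nac : Int),
      (∀ i, A.getD i 0 = 0 ∨ A.getD i 0 = 1) →
      (∀ i, i ∉ uniq → A.getD i 0 = 0) →
      (ts.foldl pvStepA
          (uniq.map (fun j => (j, pvNeighbors connections j, A.getD j 0)), res, nac)).2.1
        = (ts.foldl
            (fun (st : PySem.Dict String Int × List Int) t =>
              let cnt := ((adj.getD t []).map (fun n => st.1.getD n 0)).sum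
              (st.1.insert t (1 - st.1.getD t 0), st.2 ++ [cnt]))
            (A, res)).2 := by
  intro ts
  induction ts with
  | nil => intro _ A res nac _ _; rfl
  | cons t ts ih =>
    intro hts A res nac h01 hout
    have htu : t ∈ uniq := hts t (List.mem_cons_self ..)
    simp only [List.foldl_cons, pvStepA]
    rw [pvOuterSelect (pvNeighbors connections) (fun j => A.getD j 0)
        (fun conn => pvConnNumber conn
          (uniq.map (fun j => (j, pvNeighbors connections j, A.getD j 0)))) t uniq hnd nac,
      if_pos htu, pvConnNumberEq uniq hnd _ A hout, pvFlipMap, hadj t]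
    have hdm : uniq.map (fun j => (j, pvNeighbors connections j,
          if j = t then (if A.getD j 0 == 0 then (1 : Int) else 0) else A.getD j 0))
        = uniq.map (fun j => (j, pvNeighbors connections j,
            (A.insert t (1 - A.getD t 0)).getD j 0)) := by
      refine List.map_congr_left (fun j _ => ?_)
      rw [PySem.Dict.getD_insert]
      by_cases hjt : j = t
      · subst hjt; rcases h01 j with h | h <;> simp [h]
      · simp [hjt]
    rw [hdm]
    exact ih (fun x hx => hts x (List.mem_cons_of_mem _ hx))
      (A.insert t (1 - A.getD t 0)) _ _
      (fun i => by
        rw [PySem.Dict.getD_insert]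
        split_ifs with h
        · rcases h01 t with h' | h' <;> simp [h']
        · exact h01 i)
      (fun i hi => by
        rw [PySem.Dict.getD_insert]
        split_ifs with h
        · subst h; exact absurd htu hi
        · exact hout i hi)

-- ===== VERDICT (by name: the statement is the Claim_ definition above) =====
theorem numberOfDevices_spec : Claim_equal_numberOfDevices := by
  intro connections toggleIps _ _
  unfold Spec_numberOfDevices numberOfDevices numberOfDevices_alt
  have h := pvMainInv connections (PySem.List.dedup toggleIps)
      (PySem.List.nodup_dedup toggleIps)
      (connections.foldl pvAdjStep PySem.Dict.empty)
      (fun t => pvAdjGetD connections t)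
      toggleIps (fun t ht => (PySem.List.mem_dedup toggleIps t).2 ht)
      PySem.Dict.empty [] 0
      (fun i => Or.inl (by simp [PySem.Dict.getD_empty]))
      (fun i _ => by simp [PySem.Dict.getD_empty])
  simpa [PySem.Dict.getD_empty] using h
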